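-- pv_equiv track=rewrite | github.com/fgh23333/adk_to_openai_api | app/adk_client.py | _extract_new_content
-- ===== SOURCE A (Python) =====
-- def _extract_new_content(current: str, previous: str) -> str:
--     """Extract only the new part of content when there's overlap."""
--     if not previous:
--         return current
--
--     # Try to find where previous content appears in current
--     if previous in current:
--         return current[len(previous):]
--
--     # Try to find overlap at the end
--     max_overlap = 0
--     overlap_pos = 0
--     len_prev, len_curr = len(previous), len(current)
--
--     for i in range(1, min(len_prev, len_curr) + 1):
--         if previous[-i:] == current[:i]:
--             max_overlap = i
--             overlap_pos = i
--
--     if max_overlap > 0: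
--         return current[overlap_pos:]
--
--     # No clear overlap, return current
--     return current
-- ===== SOURCE B (Python) =====
-- def _extract_new_content(current: str, previous: str) -> str:
--     """Extract only the new part of content when there's overlap."""
--     if not previous:
--         return current
--     if previous in current:
--         return current[len(previous):]
--     # drop leading chars of previous until the rest is a prefix of current;
--     # the first (longest) such suffix is the overlap to strip
--     tail = previous
--     while tail and not current.startswith(tail):
--         tail = tail[1:]
--     return current[len(tail):]
-- ===== Notes on version B (the rewrite author's own statement) =====
-- stated objective: simpler
-- what changed: A scans all overlap lengths 1..min(len) upward while tracking a running maximum; B instead walks suffixes of `previous` from longest to shortest (dropping one leading char at a time) and stops at the first suffix that is a prefix of `current`, so it needs no accumulator or explicit index loop.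
import Mathlib
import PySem

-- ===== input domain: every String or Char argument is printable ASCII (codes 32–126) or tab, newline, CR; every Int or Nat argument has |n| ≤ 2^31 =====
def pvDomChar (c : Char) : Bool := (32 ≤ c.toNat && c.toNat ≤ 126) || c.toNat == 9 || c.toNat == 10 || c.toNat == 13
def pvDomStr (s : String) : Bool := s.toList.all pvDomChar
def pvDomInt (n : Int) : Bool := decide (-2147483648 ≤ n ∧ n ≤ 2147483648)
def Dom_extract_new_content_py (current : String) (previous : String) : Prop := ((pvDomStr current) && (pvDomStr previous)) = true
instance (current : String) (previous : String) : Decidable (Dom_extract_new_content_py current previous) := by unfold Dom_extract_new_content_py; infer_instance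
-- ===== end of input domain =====

-- B replaces A's forward max-tracking scan over all overlap lengths by a shrink-from-the-left
-- walk over suffixes of `previous` that stops at the first (= longest) prefix match: simpler, no accumulator.

-- ===== PORT A =====
-- literal transliteration of _extract_new_content: empty check, substring check,
-- then a forward loop i = 1 .. min(len_prev, len_curr) keeping (max_overlap, overlap_pos).
def extract_new_content_py (current : String) (previous : String) : String :=
  let p := previous.toList
  let c := current.toList
  if p = [] then current
  else if PySem.Chars.isIn p c then String.ofList (PySem.List.slice c (some (p.length : Int)) none)
  else
    let len_prev : Int := p.length
    let len_curr : Int := c.length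
    let st : Int × Int :=
      (PySem.List.pyRange 1 (min len_prev len_curr + 1) 1).foldl
        (fun (s : Int × Int) i =>
          if PySem.List.slice p (some (-i)) none = PySem.List.slice c none (some i) then (i, i)
          else s)
        (0, 0)
    if st.1 > 0 then String.ofList (PySem.List.slice c (some st.2) none) else current

-- ===== PORT B =====
-- B's while loop `while tail and not current.startswith(tail): tail = tail[1:]`
def altShrink (c : List Char) : List Char → List Char
  | [] => []
  | ch :: t => if PySem.Chars.startswith c (ch :: t) then ch :: t else altShrink c t

def extract_new_content_py_alt (current : String) (previous : String) : String :=
  let p := previous.toList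
  let c := current.toList
  if p = [] then current
  else if PySem.Chars.isIn p c then String.ofList (PySem.List.slice c (some (p.length : Int)) none)
  else
    let tail := altShrink c p
    String.ofList (PySem.List.slice c (some (tail.length : Int)) none)

-- ===== PRECONDITION & SPEC =====
def Spec_extract_new_content_py (current : String) (previous : String) (out : String) : Prop := out = extract_new_content_py_alt current previous
instance (current : String) (previous : String) (out : String) : Decidable (Spec_extract_new_content_py current previous out) := by unfold Spec_extract_new_content_py; infer_instance

-- ===== CLAIM (what is proved, stated in full; the proofs are below) =====
def Claim_equal_extract_new_content_py : Prop := ∀ (current : String) (previous : String), Dom_extract_new_content_py current previous → Spec_extract_new_content_py current previous (extract_new_content_py current previous)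

-- ===== LEMMAS AND PROOFS =====

-- the longest overlap length ≤ m: largest i ≤ m with current-prefix i = previous-suffix i, else 0
def bestOv (p c : List Char) : Nat → Nat
  | 0 => 0
  | (m+1) => if List.take (m+1) c = List.drop (p.length - (m+1)) p then m+1 else bestOv p c m

-- A's fold over range(1, m+1) computes (bestOv m, bestOv m)
lemma foldA_eq (p c : List Char) (m : Nat) :
    (PySem.List.pyRange 1 ((m : Int) + 1) 1).foldl
      (fun (s : Int × Int) i =>
        if PySem.List.slice p (some (-i)) none = PySem.List.slice c none (some i) then (i, i)
        else s)
      (0, 0)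
    = ((bestOv p c m : Int), (bestOv p c m : Int)) := by
  induction m with
  | zero =>
      simp [PySem.List.pyRange, bestOv]
  | succ m ih =>
      have h1 : (((m + 1 : Nat)) : Int) + 1 = ((m : Int) + 1) + 1 := by push_cast; ring
      rw [h1, PySem.List.pyRange_one_succ_right (by omega), List.foldl_append, ih]
      have hpos : ((m : Int) + 1) = (((m + 1 : Nat)) : Int) := by push_cast; ring
      simp only [List.foldl_cons, List.foldl_nil, hpos,
        PySem.List.slice_from_neg_natCast p (m + 1) (Nat.succ_pos m),
        PySem.List.slice_to_natCast, bestOv]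
      by_cases hcond : List.take (m + 1) c = List.drop (p.length - (m + 1)) p
      · rw [if_pos hcond.symm, if_pos hcond]
      · rw [if_neg (fun hc => hcond hc.symm), if_neg hcond]

lemma drop_of_suffix {t p : List Char} (h : t <:+ p) :
    List.drop (p.length - t.length) p = t := by
  obtain ⟨u, rfl⟩ := h
  simp

-- B's shrink walk finds bestOv over lengths up to the suffix's length
lemma altShrink_eq (c p : List Char) :
    ∀ t : List Char, t <:+ p → (altShrink c t).length = bestOv p c t.length := by
  intro t
  induction t with
  | nil => intro _; simp [altShrink, bestOv]
  | cons ch u ih =>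
      intro hsuf
      have hdrop : List.drop (p.length - (u.length + 1)) p = ch :: u := by
        simpa using drop_of_suffix hsuf
      by_cases h : PySem.Chars.startswith c (ch :: u) = true
      · have hpre : (ch :: u) <+: c := (PySem.Chars.startswith_iff c (ch :: u)).mp h
        have htake : List.take (u.length + 1) c = ch :: u := by
          simpa using (List.prefix_iff_eq_take.mp hpre).symm
        have he : altShrink c (ch :: u) = ch :: u := by simp [altShrink, h]
        rw [he]
        show (ch :: u).length = bestOv p c (ch :: u).length
        simp only [List.length_cons, bestOv]
        rw [if_pos (htake.trans hdrop.symm)]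
      · have hn : ¬ List.take (u.length + 1) c = ch :: u := by
          intro hc
          apply h
          rw [PySem.Chars.startswith_iff]
          exact List.prefix_iff_eq_take.mpr (by simpa using hc.symm)
        have husuf : u <:+ p := ((List.suffix_cons ch u).trans hsuf)
        have he : altShrink c (ch :: u) = altShrink c u := by simp [altShrink, h]
        rw [he]
        show (altShrink c u).length = bestOv p c (ch :: u).length
        simp only [List.length_cons, bestOv]
        rw [if_neg (fun hc => hn (hc.trans hdrop))]
        exact ih husuf

-- overlap lengths above |c| never match, so the scan may stop at min |p| |c|
lemma bestOv_cap (p c : List Char) :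
    ∀ m : Nat, m ≤ p.length → c.length ≤ m → bestOv p c m = bestOv p c c.length := by
  intro m
  induction m with
  | zero => intro _ h; have : c.length = 0 := Nat.le_zero.mp h; simp [this]
  | succ m ih =>
      intro hmp hcm
      rcases Nat.lt_or_ge c.length (m + 1) with hlt | hge
      · have hcm' : c.length ≤ m := Nat.lt_succ_iff.mp hlt
        have hfalse : ¬ List.take (m+1) c = List.drop (p.length - (m+1)) p := by
          intro hc
          have h1 : (List.take (m+1) c).length = c.length := by
            simp [Nat.min_eq_right (Nat.le_of_lt hlt)]
          have h2 : (List.drop (p.length - (m+1)) p).length = m + 1 := by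
            simp; omega
          rw [hc] at h1; omega
        simp only [bestOv, if_neg hfalse]
        exact ih (Nat.le_of_succ_le hmp) hcm'
      · have : c.length = m + 1 := Nat.le_antisymm hcm hge
        rw [this]

lemma bestOv_min (p c : List Char) :
    bestOv p c (min p.length c.length) = bestOv p c p.length := by
  rcases Nat.le_total p.length c.length with h | h
  · rw [Nat.min_eq_left h]
  · rw [Nat.min_eq_right h]
    exact (bestOv_cap p c p.length le_rfl h).symm

-- ===== VERDICT (by name: the statement is the Claim_ definition above) =====
theorem extract_new_content_py_spec : Claim_equal_extract_new_content_py := by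
  intro current previous _
  unfold Spec_extract_new_content_py extract_new_content_py extract_new_content_py_alt
  set p := previous.toList with hp
  set c := current.toList with hc
  by_cases h0 : p = []
  · simp [h0]
  · simp only [h0, if_false]
    by_cases h1 : PySem.Chars.isIn p c = true
    · simp [h1]
    · simp only [h1, if_false, Bool.false_eq_true]
      have hmin : (min (p.length : Int) (c.length : Int) + 1)
          = ((min p.length c.length : Nat) : Int) + 1 := by push_cast; ring
      rw [hmin, foldA_eq p c (min p.length c.length)]
      have hshrink : (altShrink c p).length = bestOv p c (min p.length c.length) := by
        rw [altShrink_eq c p p (List.suffix_rfl), bestOv_min]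
      rw [hshrink]
      by_cases hz : bestOv p c (min p.length c.length) = 0
      · simp [hz]
        exact String.ofList_toList.symm
      · have hpos : (0 : Int) < (bestOv p c (min p.length c.length) : Int) := by
          exact_mod_cast Nat.pos_of_ne_zero hz
        simp only [gt_iff_lt]
        rw [if_pos hpos]
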